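-- pv_equiv track=rewrite | github.com/flauschzelle/cli-wordle | cli_wordle.py | list_letters
-- ===== SOURCE A (Python) =====
-- def list_letters(words: list) -> list:
--     """
--     List all letters that are allowed.
--
--     :param words: a word list to extract the letters from
--     :return: a sorted list of all letters in the word list
--     """
--     letters: list = []
--     for w in words:
--         for ltr in w:
--             if ltr not in letters:
--                 letters.append(ltr)
--     letters.sort()
--     return letters
-- ===== SOURCE B (Python) =====
-- def list_letters(words: list) -> list:
--     """
--     List all letters that are allowed.
--
--     :param words: a word list to extract the letters from
--     :return: a sorted list of all letters in the word list
--     """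
--     chars = [c for w in words for c in w]
--     chars.sort()
--     out: list = []
--     for c in chars:
--         if not out or out[-1] != c:
--             out.append(c)
--     return out
-- ===== Notes on version B (the rewrite author's own statement) =====
-- stated objective: alternative
-- what changed: B flattens all characters into one list, sorts the whole multiset once, and then removes duplicates in a single adjacency-comparison pass, instead of A's per-character membership scan of a growing unique list followed by a final sort.
import Mathlib
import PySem

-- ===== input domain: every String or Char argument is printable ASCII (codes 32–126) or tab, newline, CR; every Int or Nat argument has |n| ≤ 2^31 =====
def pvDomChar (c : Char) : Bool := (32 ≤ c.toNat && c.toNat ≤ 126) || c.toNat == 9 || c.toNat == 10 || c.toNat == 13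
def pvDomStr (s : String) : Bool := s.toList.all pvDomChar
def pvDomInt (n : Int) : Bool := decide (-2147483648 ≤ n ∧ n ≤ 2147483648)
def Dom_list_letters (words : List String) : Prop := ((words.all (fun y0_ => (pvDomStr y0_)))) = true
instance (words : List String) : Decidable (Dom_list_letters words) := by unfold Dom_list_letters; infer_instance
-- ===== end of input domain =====

-- B sorts the flat multiset of all characters once and removes duplicates in a single
-- adjacency pass, instead of A's membership scan of a growing unique list followed by a
-- sort (an alternative algorithm of comparable cost).

-- ===== PORT A =====
-- letters = []; for w in words: for ltr in w: if ltr not in letters: letters.append(ltr); letters.sort()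
def list_letters (words : List String) : List String :=
  PySem.List.sorted
    (words.foldl (fun acc w =>
      w.toList.foldl (fun acc c =>
        if String.singleton c ∈ acc then acc else acc ++ [String.singleton c]) acc) [])
    (fun x => x) false

-- ===== PORT B =====
-- chars = [c for w in words for c in w]; chars.sort();
-- out = []; for c in chars: if not out or out[-1] != c: out.append(c); return out
def list_letters_alt (words : List String) : List String :=
  let chars := words.flatMap (fun w => w.toList.map (fun c => String.singleton c))
  let sortedChars := PySem.List.sorted chars (fun x => x) false
  sortedChars.foldl
    (fun out c => if out = [] ∨ out.getLast? ≠ some c then out ++ [c] else out) []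

-- ===== PRECONDITION & SPEC =====
def Spec_list_letters (words : List String) (out : List String) : Prop := out = list_letters_alt words
instance (words : List String) (out : List String) : Decidable (Spec_list_letters words out) := by unfold Spec_list_letters; infer_instance

-- ===== CLAIM =====
def Claim_equal_list_letters : Prop := ∀ (words : List String), Dom_list_letters words → Spec_list_letters words (list_letters words)

-- ===== LEMMAS AND PROOFS =====

-- A's accumulation step (ordered first-occurrence dedup).
def pvDed (acc : List String) (s : String) : List String :=
  if s ∈ acc then acc else acc ++ [s]

lemma pvDed_fold (l : List String) (acc : List String) (h : acc.Nodup) :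
    (l.foldl pvDed acc).Nodup ∧ ∀ x, x ∈ l.foldl pvDed acc ↔ x ∈ acc ∨ x ∈ l := by
  induction l generalizing acc with
  | nil => exact ⟨h, fun x => by simp⟩
  | cons a t ih =>
    rw [List.foldl_cons]
    by_cases ha : a ∈ acc
    · rw [show pvDed acc a = acc by simp [pvDed, ha]]
      obtain ⟨n, m⟩ := ih acc h
      refine ⟨n, fun x => ?_⟩
      rw [m x, List.mem_cons]
      constructor
      · rintro (h1 | h1)
        · exact Or.inl h1
        · exact Or.inr (Or.inr h1)
      · rintro (h1 | rfl | h1)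
        · exact Or.inl h1
        · exact Or.inl ha
        · exact Or.inr h1
    · rw [show pvDed acc a = acc ++ [a] by simp [pvDed, ha]]
      have hacc : (acc ++ [a]).Nodup := by
        rw [List.nodup_append]
        refine ⟨h, List.nodup_singleton a, ?_⟩
        intro y hy z hz
        rw [List.mem_singleton] at hz
        subst hz
        intro hya
        exact ha (hya ▸ hy)
      obtain ⟨n, m⟩ := ih (acc ++ [a]) hacc
      refine ⟨n, fun x => ?_⟩
      rw [m x, List.mem_append, List.mem_singleton, List.mem_cons]
      tauto

-- B's accumulation step (adjacency dedup of a sorted list).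
def pvAdj (out : List String) (c : String) : List String :=
  if out = [] ∨ out.getLast? ≠ some c then out ++ [c] else out

lemma pvAdj_fold (l : List String) (acc : List String)
    (hl : l.Pairwise (· ≤ ·))
    (hacc : acc.Pairwise (· < ·))
    (hbound : ∀ a ∈ acc, ∀ b ∈ l, a ≤ b)
    (hlast : ∀ m, acc.getLast? = some m → ∀ a ∈ acc, a ≤ m) :
    (l.foldl pvAdj acc).Pairwise (· < ·) ∧ ∀ x, x ∈ l.foldl pvAdj acc ↔ x ∈ acc ∨ x ∈ l := by
  induction l generalizing acc with
  | nil => exact ⟨hacc, fun x => by simp⟩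
  | cons c t ih =>
    rw [List.foldl_cons]
    have hle : ∀ b ∈ t, c ≤ b := (List.pairwise_cons.mp hl).1
    have ht : t.Pairwise (· ≤ ·) := (List.pairwise_cons.mp hl).2
    by_cases hskip : acc = [] ∨ acc.getLast? ≠ some c
    · rw [show pvAdj acc c = acc ++ [c] by simp [pvAdj, hskip]]
      have hacclt : ∀ a ∈ acc, a < c := by
        intro a ha
        rcases hskip with h0 | hne
        · simp [h0] at ha
        · have hne' : acc ≠ [] := by rintro rfl; simp at ha
          obtain ⟨m, hm⟩ : ∃ m, acc.getLast? = some m :=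
            ⟨acc.getLast hne', List.getLast?_eq_some_getLast hne'⟩
          have ham : a ≤ m := hlast m hm a ha
          have hmc : m ≤ c := hbound m (List.mem_of_getLast? hm) c (List.mem_cons_self)
          have : m ≠ c := by intro h; exact hne (h ▸ hm)
          exact lt_of_le_of_lt ham (lt_of_le_of_ne hmc this)
      have hacc' : (acc ++ [c]).Pairwise (· < ·) := by
        rw [List.pairwise_append]
        exact ⟨hacc, List.pairwise_singleton _ _, fun a ha b hb => by
          rw [List.mem_singleton] at hb; exact hb ▸ hacclt a ha⟩
      have hbound' : ∀ a ∈ acc ++ [c], ∀ b ∈ t, a ≤ b := by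
        intro a ha b hb
        rw [List.mem_append, List.mem_singleton] at ha
        rcases ha with ha | rfl
        · exact hbound a ha b (List.mem_cons_of_mem _ hb)
        · exact hle b hb
      have hlast' : ∀ m, (acc ++ [c]).getLast? = some m → ∀ a ∈ acc ++ [c], a ≤ m := by
        intro m hm a ha
        rw [List.getLast?_concat, Option.some.injEq] at hm
        subst hm
        rw [List.mem_append, List.mem_singleton] at ha
        rcases ha with ha | rfl
        · exact le_of_lt (hacclt a ha)
        · exact le_refl _
      obtain ⟨p, m⟩ := ih (acc ++ [c]) ht hacc' hbound' hlast'
      refine ⟨p, fun x => ?_⟩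
      rw [m x, List.mem_append, List.mem_singleton, List.mem_cons]
      tauto
    · rw [show pvAdj acc c = acc by simp only [pvAdj, if_neg hskip]]
      push_neg at hskip
      have hc : c ∈ acc := by
        have := hskip.2
        exact List.mem_of_getLast? this
      have hbound' : ∀ a ∈ acc, ∀ b ∈ t, a ≤ b :=
        fun a ha b hb => hbound a ha b (List.mem_cons_of_mem _ hb)
      obtain ⟨p, m⟩ := ih acc ht hacc hbound' hlast
      refine ⟨p, fun x => ?_⟩
      rw [m x, List.mem_cons]
      constructor
      · rintro (h1 | h1)
        · exact Or.inl h1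
        · exact Or.inr (Or.inr h1)
      · rintro (h1 | rfl | h1)
        · exact Or.inl h1
        · exact Or.inl hc
        · exact Or.inr h1

-- ===== VERDICT =====
theorem list_letters_spec : Claim_equal_list_letters := by
  intro words _
  unfold Spec_list_letters list_letters list_letters_alt
  set chars := words.flatMap (fun w => w.toList.map (fun c => String.singleton c)) with hC
  set S := PySem.List.sorted chars (fun x => x) false with hS
  -- A's inner fold is pvDed over the flat character list
  have h1 : (words.foldl (fun acc w =>
      w.toList.foldl (fun acc c =>
        if String.singleton c ∈ acc then acc else acc ++ [String.singleton c]) acc) [])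
      = chars.foldl pvDed [] := by
    rw [hC, List.flatMap_def, List.foldl_flatten, List.foldl_map]
    simp only [List.foldl_map]
    simp [pvDed]
  rw [h1]
  obtain ⟨hAnod, hAmem⟩ := pvDed_fold chars [] List.nodup_nil
  -- B's fold over the sorted characters
  have hSsorted : S.Pairwise (· ≤ ·) := PySem.List.sorted_pairwise chars (fun x => x)
  obtain ⟨hBlt, hBmem⟩ := pvAdj_fold S [] hSsorted List.Pairwise.nil
    (by intro a ha; simp at ha) (by intro m hm; simp at hm)
  have hBnod : (S.foldl pvAdj []).Nodup := hBlt.imp (fun h => ne_of_lt h)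
  have hperm : (S.foldl pvAdj []).Perm (chars.foldl pvDed []) := by
    rw [List.perm_ext_iff_of_nodup hBnod hAnod]
    intro a
    rw [hBmem a, hAmem a]
    simp [hS, PySem.List.mem_sorted]
  show (PySem.List.sorted (chars.foldl pvDed []) (fun x => x) false) = S.foldl pvAdj []
  exact PySem.List.sorted_eq_of_perm_of_pairwise_lt _ _ _ hperm hBlt
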